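-- pv_equiv track=rewrite | github.com/SurvivingJ/LinguaLoop-web | Portal/MathDojo/math_engine.py | _has_borrow_across_zero
-- ===== SOURCE A (Python) =====
-- def _has_borrow_across_zero(a, b):
--     """Check if subtraction a - b requires borrowing through a 0 digit in a."""
--     borrow = 0
--     while a > 0 or b > 0:
--         da = (a % 10) - borrow
--         db = b % 10
--         if da < db:
--             borrow = 1
--             # Check if the next digit of a is 0 (borrow across zero)
--             next_digit = (a // 10) % 10
--             if next_digit == 0 and a // 10 > 0:
--                 return True
--         else:
--             borrow = 0
--         a //= 10
--         b //= 10
--     return False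
-- ===== SOURCE B (Python) =====
-- def _has_borrow_across_zero(a, b):
--     # Stateless reformulation: a borrow out of position k happens iff
--     # a % 10**(k+1) < b % 10**(k+1); the "across zero" hit additionally
--     # needs the next digit of a to be 0 with more digits above it.
--     n = 0
--     t = a
--     while t > 0:
--         t //= 10
--         n += 1
--     return any(
--         a % 10 ** (k + 1) < b % 10 ** (k + 1)
--         and (a // 10 ** (k + 1)) % 10 == 0
--         and a // 10 ** (k + 1) > 0
--         for k in range(n)
--     )
-- ===== Notes on version B (the rewrite author's own statement) =====
-- stated objective: alternative
-- what changed: A walks the digits with a mutable borrow state and an early return; B has no borrow state at all: it tests each position k independently with the closed-form borrow criterion a % 10**(k+1) < b % 10**(k+1) and ORs the hits over the digit positions of a.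
import Mathlib
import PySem

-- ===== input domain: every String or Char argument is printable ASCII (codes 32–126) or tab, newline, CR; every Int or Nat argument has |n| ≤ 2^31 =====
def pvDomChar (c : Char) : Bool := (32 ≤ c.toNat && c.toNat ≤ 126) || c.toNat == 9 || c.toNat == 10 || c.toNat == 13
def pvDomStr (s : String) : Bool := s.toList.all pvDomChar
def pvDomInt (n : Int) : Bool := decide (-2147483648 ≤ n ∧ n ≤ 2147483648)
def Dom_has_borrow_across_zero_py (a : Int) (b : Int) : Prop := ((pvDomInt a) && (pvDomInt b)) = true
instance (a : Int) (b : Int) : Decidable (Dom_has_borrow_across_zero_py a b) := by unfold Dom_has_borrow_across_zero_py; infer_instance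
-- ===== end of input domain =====

-- B replaces A's stateful borrow-chain loop with a stateless per-position test
-- (borrow out of position k iff a % 10^(k+1) < b % 10^(k+1)); objective: alternative.

-- termination helper for the ports' loops (cited in decreasing_by)
theorem pvDecMeasure (a b : Int) (h : 0 < a ∨ 0 < b) :
    (PySem.Int.floordiv a 10).toNat + (PySem.Int.floordiv b 10).toNat < a.toNat + b.toNat := by
  rw [PySem.Int.floordiv_eq_ediv_of_pos (by norm_num), PySem.Int.floordiv_eq_ediv_of_pos (by norm_num)]
  omega

theorem pvDecNd (t : Int) (h : 0 < t) : (PySem.Int.floordiv t 10).toNat < t.toNat := by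
  rw [PySem.Int.floordiv_eq_ediv_of_pos (by norm_num)]
  omega

-- ===== PORT A =====
-- the while-loop of A, with its mutable `borrow` as a parameter
def pvLoopA (a b borrow : Int) : Bool :=
  if 0 < a ∨ 0 < b then
    if PySem.Int.mod a 10 - borrow < PySem.Int.mod b 10 then
      if PySem.Int.mod (PySem.Int.floordiv a 10) 10 = 0 ∧ 0 < PySem.Int.floordiv a 10 then
        true
      else
        pvLoopA (PySem.Int.floordiv a 10) (PySem.Int.floordiv b 10) 1
    else
      pvLoopA (PySem.Int.floordiv a 10) (PySem.Int.floordiv b 10) 0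
  else false
termination_by a.toNat + b.toNat
decreasing_by all_goals exact pvDecMeasure a b (by assumption)

def has_borrow_across_zero_py (a : Int) (b : Int) : Bool := pvLoopA a b 0

-- ===== PORT B =====
-- B's digit-count loop (n = 0; while t > 0: t //= 10; n += 1)
def pvNdigits (t : Int) : Nat :=
  if 0 < t then pvNdigits (PySem.Int.floordiv t 10) + 1 else 0
termination_by t.toNat
decreasing_by exact pvDecNd t (by assumption)

def has_borrow_across_zero_py_alt (a : Int) (b : Int) : Bool :=
  (List.range (pvNdigits a)).any (fun k =>
    decide (PySem.Int.mod a (10 ^ (k + 1)) < PySem.Int.mod b (10 ^ (k + 1))) &&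
    decide (PySem.Int.mod (PySem.Int.floordiv a (10 ^ (k + 1))) 10 = 0) &&
    decide (0 < PySem.Int.floordiv a (10 ^ (k + 1))))

-- ===== PRECONDITION & SPEC =====
def Spec_has_borrow_across_zero_py (a : Int) (b : Int) (out : Bool) : Prop := out = has_borrow_across_zero_py_alt a b
instance (a : Int) (b : Int) (out : Bool) : Decidable (Spec_has_borrow_across_zero_py a b out) := by unfold Spec_has_borrow_across_zero_py; infer_instance

-- ===== CLAIM (what is proved, stated in full; the proofs are below) =====
def Claim_equal_has_borrow_across_zero_py : Prop := ∀ (a : Int) (b : Int), Dom_has_borrow_across_zero_py a b → Spec_has_borrow_across_zero_py a b (has_borrow_across_zero_py a b)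

-- ===== LEMMAS AND PROOFS =====

-- "a hit at position k, given initial borrow br": the stateless description of A's loop
def HitB (a b br : Int) (k : Nat) : Prop :=
  a % 10 ^ (k + 1) < b % 10 ^ (k + 1) + br ∧ a / 10 ^ (k + 1) % 10 = 0 ∧ 0 < a / 10 ^ (k + 1)

theorem pvDivNonpos (a P : Int) (ha : a ≤ 0) (hP : 0 < P) : a / P ≤ 0 := by
  have h := Int.ediv_le_ediv hP ha
  simpa using h

theorem pvDecomp (a P : Int) (hP : 0 < P) : a % (10 * P) = 10 * (a / 10 % P) + a % 10 := by
  have e1 : 10 * (a / 10) + a % 10 = a := Int.mul_ediv_add_emod a 10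
  have e2 : P * (a / 10 / P) + a / 10 % P = a / 10 := Int.mul_ediv_add_emod (a / 10) P
  have hb1 : 0 ≤ a % 10 := Int.emod_nonneg a (by norm_num)
  have hb2 : a % 10 < 10 := Int.emod_lt_of_pos a (by norm_num)
  have hb3 : 0 ≤ a / 10 % P := Int.emod_nonneg _ (by omega)
  have hb4 : a / 10 % P < P := Int.emod_lt_of_pos _ hP
  have h10P : (0 : Int) < 10 * P := by positivity
  have key := (Int.ediv_emod_unique (a := a) (b := 10 * P)
      (q := a / 10 / P) (r := 10 * (a / 10 % P) + a % 10) h10P).mpr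
      ⟨by nlinarith [e1, e2], by linarith, by linarith⟩
  exact key.2

theorem pvCmpShift (a b br P : Int) (hP : 0 < P) (hbr : br = 0 ∨ br = 1) :
    (a % (10 * P) < b % (10 * P) + br) ↔
      (a / 10 % P < b / 10 % P + (if a % 10 < b % 10 + br then (1 : Int) else 0)) := by
  rw [pvDecomp a P hP, pvDecomp b P hP]
  have hx1 : 0 ≤ a % 10 := Int.emod_nonneg a (by norm_num)
  have hx2 : a % 10 < 10 := Int.emod_lt_of_pos a (by norm_num)
  have hy1 : 0 ≤ b % 10 := Int.emod_nonneg b (by norm_num)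
  have hy2 : b % 10 < 10 := Int.emod_lt_of_pos b (by norm_num)
  generalize a / 10 % P = X
  generalize b / 10 % P = Y
  split_ifs with h <;> omega

theorem pvHitShift (a b br : Int) (hbr : br = 0 ∨ br = 1) (k : Nat) :
    HitB (a / 10) (b / 10) (if a % 10 < b % 10 + br then (1 : Int) else 0) k ↔
      HitB a b br (k + 1) := by
  have hP : (0 : Int) < 10 ^ (k + 1) := by positivity
  have hpow : (10 : Int) ^ (k + 1 + 1) = 10 * 10 ^ (k + 1) := by ring
  have hda : a / 10 / 10 ^ (k + 1) = a / (10 * 10 ^ (k + 1)) :=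
    Int.ediv_ediv_of_nonneg (by norm_num)
  unfold HitB
  rw [hpow, ← hda, ← pvCmpShift a b br (10 ^ (k + 1)) hP hbr]

-- conversion of the ports' PySem arithmetic to `/` and `%`
theorem pvMod10 (x : Int) : PySem.Int.mod x 10 = x % 10 :=
  PySem.Int.mod_eq_emod_of_pos (by norm_num)
theorem pvDiv10 (x : Int) : PySem.Int.floordiv x 10 = x / 10 :=
  PySem.Int.floordiv_eq_ediv_of_pos (by norm_num)
theorem pvModP (x : Int) (k : Nat) : PySem.Int.mod x (10 ^ (k + 1)) = x % 10 ^ (k + 1) :=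
  PySem.Int.mod_eq_emod_of_pos (by positivity)
theorem pvDivP (x : Int) (k : Nat) : PySem.Int.floordiv x (10 ^ (k + 1)) = x / 10 ^ (k + 1) :=
  PySem.Int.floordiv_eq_ediv_of_pos (by positivity)

theorem pvLoop_iff : ∀ (a b br : Int), (br = 0 ∨ br = 1) →
    (pvLoopA a b br = true ↔ ∃ k, HitB a b br k) := by
  intro a b br
  induction a, b, br using pvLoopA.induct with
  | case1 a b br h hlt hhit =>
    intro hbr
    rw [pvLoopA]
    simp only [if_pos h, if_pos hlt, if_pos hhit, true_iff]
    refine ⟨0, ?_, ?_, ?_⟩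
    · rw [pvMod10, pvMod10] at hlt
      simp only [zero_add, pow_one]
      omega
    · simpa [pow_one, pvMod10, pvDiv10] using hhit.1
    · simpa [pow_one, pvDiv10] using hhit.2
  | case2 a b br h hlt hhit ih =>
    intro hbr
    rw [pvLoopA]
    simp only [if_pos h, if_pos hlt, if_neg hhit]
    rw [ih (Or.inr rfl)]
    have hcond : a % 10 < b % 10 + br := by
      rw [pvMod10, pvMod10] at hlt; omega
    have hif : (if a % 10 < b % 10 + br then (1 : Int) else 0) = 1 := if_pos hcond
    constructor
    · rintro ⟨k, hk⟩
      refine ⟨k + 1, ?_⟩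
      rw [← pvHitShift a b br hbr k, hif]
      simpa [pvDiv10] using hk
    · rintro ⟨k, hk⟩
      cases k with
      | zero =>
        exfalso
        apply hhit
        refine ⟨?_, ?_⟩
        · rw [pvMod10, pvDiv10]; simpa [pow_one] using hk.2.1
        · rw [pvDiv10]; simpa [pow_one] using hk.2.2
      | succ k =>
        refine ⟨k, ?_⟩
        have := (pvHitShift a b br hbr k).mpr hk
        rw [hif] at this
        simpa [pvDiv10] using this
  | case3 a b br h hlt ih =>
    intro hbr
    rw [pvLoopA]
    simp only [if_pos h, if_neg hlt]
    rw [ih (Or.inl rfl)]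
    have hcond : ¬ (a % 10 < b % 10 + br) := by
      rw [pvMod10, pvMod10] at hlt; omega
    have hif : (if a % 10 < b % 10 + br then (1 : Int) else 0) = 0 := if_neg hcond
    constructor
    · rintro ⟨k, hk⟩
      refine ⟨k + 1, ?_⟩
      rw [← pvHitShift a b br hbr k, hif]
      simpa [pvDiv10] using hk
    · rintro ⟨k, hk⟩
      cases k with
      | zero =>
        exfalso
        apply hcond
        simpa [pow_one] using hk.1
      | succ k =>
        refine ⟨k, ?_⟩
        have := (pvHitShift a b br hbr k).mpr hk
        rw [hif] at this
        simpa [pvDiv10] using this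
  | case4 a b br h =>
    intro _hbr
    rw [pvLoopA]
    simp only [if_neg h]
    refine iff_of_false Bool.false_ne_true ?_
    rintro ⟨k, hk⟩
    have ha : a ≤ 0 := by omega
    have : a / 10 ^ (k + 1) ≤ 0 := pvDivNonpos a _ ha (by positivity)
    exact absurd hk.2.2 (by omega)

theorem pvHit_lt_ndigits : ∀ (k : Nat) (a : Int), 0 < a / 10 ^ (k + 1) → k < pvNdigits a := by
  intro k
  induction k with
  | zero =>
    intro a h
    have ha : 0 < a := by
      by_contra hc
      have := pvDivNonpos a (10 ^ (0 + 1)) (by omega) (by positivity)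
      omega
    rw [pvNdigits, if_pos ha]
    omega
  | succ k ih =>
    intro a h
    have ha : 0 < a := by
      by_contra hc
      have := pvDivNonpos a (10 ^ (k + 1 + 1)) (by omega) (by positivity)
      omega
    have hsplit : a / 10 ^ (k + 1 + 1) = a / 10 / 10 ^ (k + 1) := by
      rw [Int.ediv_ediv_of_nonneg (by norm_num : (0:Int) ≤ 10)]
      ring_nf
    rw [hsplit] at h
    have := ih (a / 10) h
    rw [pvNdigits, if_pos ha, pvDiv10]
    omega

theorem pvAltPred (a b : Int) (k : Nat) :
    ((decide (PySem.Int.mod a (10 ^ (k + 1)) < PySem.Int.mod b (10 ^ (k + 1))) &&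
      decide (PySem.Int.mod (PySem.Int.floordiv a (10 ^ (k + 1))) 10 = 0) &&
      decide (0 < PySem.Int.floordiv a (10 ^ (k + 1)))) = true) ↔ HitB a b 0 k := by
  simp only [pvModP, pvDivP, pvMod10]
  unfold HitB
  simp [and_assoc, add_zero]

-- ===== VERDICT (by name: the statement is the Claim_ definition above) =====
theorem has_borrow_across_zero_py_spec : Claim_equal_has_borrow_across_zero_py := by
  intro a b _
  unfold Spec_has_borrow_across_zero_py
  rw [Bool.eq_iff_iff]
  unfold has_borrow_across_zero_py has_borrow_across_zero_py_alt
  rw [pvLoop_iff a b 0 (Or.inl rfl), List.any_eq_true]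
  constructor
  · rintro ⟨k, hk⟩
    exact ⟨k, List.mem_range.mpr (pvHit_lt_ndigits k a hk.2.2), (pvAltPred a b k).mpr hk⟩
  · rintro ⟨k, _, hk⟩
    exact ⟨k, (pvAltPred a b k).mp hk⟩
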